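-- pv_equiv track=rewrite | github.com/nordcap/stepik | Python: основы и применение/3. Применение Python: анализ текста/3.5-2.py | find_path
-- ===== SOURCE A (Python) =====
-- def find_path(graph, start, end, path=[]):
--     path = path + [start]
--     if start == end:
--         return path
--     if not start in graph:
--         return None
--     for node in graph[start]:
--         if node not in path:
--             newpath = find_path(graph, node, end, path)
--             if newpath: return newpath
--     return None
-- ===== SOURCE B (Python) =====
-- def find_path(graph, start, end, path=[]):
--     onpath = set(path)   # membership set for the current path
--     trail = list(path)   # the path being built; popped on backtracking
--
--     def dfs(node):
--         trail.append(node)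
--         if node == end:
--             return True
--         onpath.add(node)
--         if node in graph:
--             for nxt in graph[node]:
--                 if nxt not in onpath:
--                     if dfs(nxt):
--                         return True
--         onpath.discard(node)
--         trail.pop()
--         return False
--
--     return trail if dfs(start) else None
-- ===== Notes on version B (the rewrite author's own statement) =====
-- stated objective: alternative
-- what changed: A rebuilds the whole path (path + [start]) and rescans it as a list (node not in path) at every recursive step; B instead threads one shared membership set plus a single trail list that is appended to and popped on backtracking, trading A's per-step list copies/scans for set bookkeeping.
import Mathlib
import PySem

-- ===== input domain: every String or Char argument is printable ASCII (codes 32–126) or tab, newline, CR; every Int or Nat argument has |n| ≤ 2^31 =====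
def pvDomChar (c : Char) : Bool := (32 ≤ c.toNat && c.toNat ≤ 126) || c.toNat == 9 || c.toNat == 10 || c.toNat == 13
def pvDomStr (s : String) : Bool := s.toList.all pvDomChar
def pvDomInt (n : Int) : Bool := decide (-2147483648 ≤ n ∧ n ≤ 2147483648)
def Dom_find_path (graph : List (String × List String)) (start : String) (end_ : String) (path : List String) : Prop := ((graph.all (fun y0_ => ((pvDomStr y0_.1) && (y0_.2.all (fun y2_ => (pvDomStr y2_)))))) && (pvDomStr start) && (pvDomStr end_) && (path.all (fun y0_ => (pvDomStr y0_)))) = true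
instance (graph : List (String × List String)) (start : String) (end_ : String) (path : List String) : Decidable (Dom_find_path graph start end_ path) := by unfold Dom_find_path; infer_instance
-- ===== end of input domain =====

-- B replaces A's per-step path copies (path + [start]) and list-membership scans by one shared
-- membership set and a single backtracking trail list; equivalence is about the return value.

-- Termination measure helpers (cited by the ports' decreasing_by; nothing else above the claim uses them).
def pvKeysLeft (graph : List (String × List String)) (p : List String) : Nat :=
  ((graph.map Prod.fst).filter (fun k => decide (k ∉ p))).length

lemma pvKeysLeft_lt (graph : List (String × List String)) (p : List String) (s : String)
    (h1 : s ∈ graph.map Prod.fst) (h2 : s ∉ p) :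
    pvKeysLeft graph (p ++ [s]) < pvKeysLeft graph p := by
  unfold pvKeysLeft
  have he : (graph.map Prod.fst).filter (fun k => decide (k ∉ p ++ [s]))
      = ((graph.map Prod.fst).filter (fun k => decide (k ∉ p))).filter (fun k => decide (k ≠ s)) := by
    rw [List.filter_filter]
    apply List.filter_congr
    intro x _
    simp [List.mem_append, Bool.and_comm]
  rw [he]
  have hs : s ∈ (graph.map Prod.fst).filter (fun k => decide (k ∉ p)) := by
    simp [List.mem_filter, h1, h2]
  apply List.length_filter_lt_length_iff_exists.mpr
  exact ⟨s, hs, by simp⟩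

lemma pvKeysLeft_eq (graph : List (String × List String)) (p : List String) (s : String)
    (h : s ∈ p) : pvKeysLeft graph (p ++ [s]) = pvKeysLeft graph p := by
  unfold pvKeysLeft
  congr 1
  apply List.filter_congr
  intro x _
  simp only [List.mem_append, List.mem_singleton, decide_eq_decide]
  constructor
  · intro hx hxp; exact hx (Or.inl hxp)
  · rintro hx (hxp | rfl)
    · exact hx hxp
    · exact hx h

lemma pv_mem_keys_of_get?_eq_some (graph : List (String × List String)) (s : String)
    (nbrs : List String) (h : (PySem.Dict.mk graph).get? s = some nbrs) :
    s ∈ graph.map Prod.fst := by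
  by_contra hn
  rw [(PySem.Dict.get?_eq_none_iff_not_mem_keys (PySem.Dict.mk graph) s).mpr
    (by simpa using hn)] at h
  simp at h

-- ===== PORT A =====
-- `path = path + [start]`, linear `node not in path` scans, recursion per neighbour;
-- `for node in graph[start]` with early return is fp_loop; `if newpath:` is the `newpath = []` test.
mutual
def find_path (graph : List (String × List String)) (start : String) (end_ : String)
    (path : List String) : Option (List String) :=
  let path' := path ++ [start]
  if start = end_ then some path'
  else
    match hg : (PySem.Dict.mk graph).get? start with
    | none => none
    | some nbrs => fp_loop graph end_ path' nbrs
termination_by (2 * pvKeysLeft graph path + (if start ∈ path then 1 else 0), 1, 0)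
decreasing_by
  have hk := pv_mem_keys_of_get?_eq_some graph start nbrs hg
  by_cases hp : start ∈ path
  · apply Prod.Lex.right'
    · simp [pvKeysLeft_eq graph path start hp, hp]
    · exact Prod.Lex.left _ _ (by omega)
  · apply Prod.Lex.left
    have := pvKeysLeft_lt graph path start hk hp
    simp [hp]; omega

def fp_loop (graph : List (String × List String)) (end_ : String) (path : List String)
    (nbrs : List String) : Option (List String) :=
  match nbrs with
  | [] => none
  | node :: rest =>
    if node ∈ path then fp_loop graph end_ path rest
    else
      match find_path graph node end_ path with
      | some newpath => if newpath = [] then fp_loop graph end_ path rest else some newpath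
      | none => fp_loop graph end_ path rest
termination_by (2 * pvKeysLeft graph path + 1, 0, nbrs.length)
decreasing_by
  all_goals first
  | (apply Prod.Lex.right; apply Prod.Lex.right; simp)
  | (apply Prod.Lex.left; simp [*]; omega)
  | (apply Prod.Lex.left; simp [*])
end

-- ===== PORT B =====
-- Source B: one set `onpath` for membership, one trail list; on failure Python restores
-- `onpath`/`trail` to exactly their values at the call, so the port passes them on unchanged.
mutual
def fpb_dfs (graph : List (String × List String)) (end_ : String) (node : String)
    (onpath : PySem.Set String) (trail : List String) : Option (List String) :=
  let trail' := trail ++ [node]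
  if node = end_ then some trail'
  else
    let onpath' := PySem.Set.add onpath node
    match hg : (PySem.Dict.mk graph).get? node with
    | none => none
    | some nbrs => fpb_scan graph end_ nbrs onpath' trail'
termination_by (2 * pvKeysLeft graph onpath + (if node ∈ onpath then 1 else 0), 1, 0)
decreasing_by
  have hk := pv_mem_keys_of_get?_eq_some graph node nbrs hg
  by_cases hp : node ∈ onpath
  · apply Prod.Lex.right'
    · simp [hp]
    · exact Prod.Lex.left _ _ (by omega)
  · apply Prod.Lex.left
    have := pvKeysLeft_lt graph onpath node hk hp
    simp [hp]; omega

def fpb_scan (graph : List (String × List String)) (end_ : String) (nbrs : List String)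
    (onpath : PySem.Set String) (trail : List String) : Option (List String) :=
  match nbrs with
  | [] => none
  | nxt :: rest =>
    if nxt ∈ onpath then fpb_scan graph end_ rest onpath trail
    else
      match fpb_dfs graph end_ nxt onpath trail with
      | some t => some t
      | none => fpb_scan graph end_ rest onpath trail
termination_by (2 * pvKeysLeft graph onpath + 1, 0, nbrs.length)
decreasing_by
  all_goals first
  | (apply Prod.Lex.right; apply Prod.Lex.right; simp)
  | (apply Prod.Lex.left; simp [*]; omega)
  | (apply Prod.Lex.left; simp [*])
end

def find_path_alt (graph : List (String × List String)) (start : String) (end_ : String)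
    (path : List String) : Option (List String) :=
  fpb_dfs graph end_ start (PySem.Set.ofList path) path

-- ===== PRECONDITION & SPEC =====
def Spec_find_path (graph : List (String × List String)) (start : String) (end_ : String) (path : List String) (out : Option (List String)) : Prop := out = find_path_alt graph start end_ path
instance (graph : List (String × List String)) (start : String) (end_ : String) (path : List String) (out : Option (List String)) : Decidable (Spec_find_path graph start end_ path out) := by unfold Spec_find_path; infer_instance

-- ===== CLAIM (what is proved, stated in full; the proofs are below) =====
def Claim_equal_find_path : Prop := ∀ (graph : List (String × List String)) (start : String) (end_ : String) (path : List String), Dom_find_path graph start end_ path → Spec_find_path graph start end_ path (find_path graph start end_ path)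

-- ===== LEMMAS AND PROOFS =====

-- step (one-unfolding) lemmas for A's port
lemma find_path_end (graph : List (String × List String)) (start end_ : String)
    (path : List String) (h : start = end_) :
    find_path graph start end_ path = some (path ++ [start]) := by
  rw [find_path.eq_def]; simp [h]
lemma find_path_none (graph : List (String × List String)) (start end_ : String)
    (path : List String) (h1 : start ≠ end_) (h2 : (PySem.Dict.mk graph).get? start = none) :
    find_path graph start end_ path = none := by
  rw [find_path.eq_def]; simp only [if_neg h1]; split <;> simp_all
lemma find_path_some (graph : List (String × List String)) (start end_ : String)
    (path : List String) (nbrs : List String) (h1 : start ≠ end_)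
    (h2 : (PySem.Dict.mk graph).get? start = some nbrs) :
    find_path graph start end_ path = fp_loop graph end_ (path ++ [start]) nbrs := by
  rw [find_path.eq_def]; simp only [if_neg h1]; split <;> simp_all
lemma fp_loop_nil (graph : List (String × List String)) (end_ : String) (path : List String) :
    fp_loop graph end_ path [] = none := by
  rw [fp_loop.eq_def]
lemma fp_loop_mem (graph : List (String × List String)) (end_ : String) (path : List String)
    (node : String) (rest : List String) (h : node ∈ path) :
    fp_loop graph end_ path (node :: rest) = fp_loop graph end_ path rest := by
  rw [fp_loop.eq_def]; simp [h]
lemma fp_loop_notmem (graph : List (String × List String)) (end_ : String) (path : List String)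
    (node : String) (rest : List String) (h : node ∉ path) :
    fp_loop graph end_ path (node :: rest) =
      match find_path graph node end_ path with
      | some newpath => if newpath = [] then fp_loop graph end_ path rest else some newpath
      | none => fp_loop graph end_ path rest := by
  rw [fp_loop.eq_def]; simp [h]

-- step lemmas for B's port
lemma fpb_dfs_end (graph : List (String × List String)) (end_ node : String)
    (onpath : PySem.Set String) (trail : List String) (h : node = end_) :
    fpb_dfs graph end_ node onpath trail = some (trail ++ [node]) := by
  rw [fpb_dfs.eq_def]; simp [h]
lemma fpb_dfs_none (graph : List (String × List String)) (end_ node : String)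
    (onpath : PySem.Set String) (trail : List String) (h1 : node ≠ end_)
    (h2 : (PySem.Dict.mk graph).get? node = none) :
    fpb_dfs graph end_ node onpath trail = none := by
  rw [fpb_dfs.eq_def]; simp only [if_neg h1]; split <;> simp_all
lemma fpb_dfs_some (graph : List (String × List String)) (end_ node : String)
    (onpath : PySem.Set String) (trail : List String) (nbrs : List String) (h1 : node ≠ end_)
    (h2 : (PySem.Dict.mk graph).get? node = some nbrs) :
    fpb_dfs graph end_ node onpath trail =
      fpb_scan graph end_ nbrs (onpath.add node) (trail ++ [node]) := by
  rw [fpb_dfs.eq_def]; simp only [if_neg h1]; split <;> simp_all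
lemma fpb_scan_nil (graph : List (String × List String)) (end_ : String)
    (onpath : PySem.Set String) (trail : List String) :
    fpb_scan graph end_ [] onpath trail = none := by
  rw [fpb_scan.eq_def]
lemma fpb_scan_mem (graph : List (String × List String)) (end_ : String) (nxt : String)
    (rest : List String) (onpath : PySem.Set String) (trail : List String) (h : nxt ∈ onpath) :
    fpb_scan graph end_ (nxt :: rest) onpath trail = fpb_scan graph end_ rest onpath trail := by
  rw [fpb_scan.eq_def]; simp [h]
lemma fpb_scan_notmem (graph : List (String × List String)) (end_ : String) (nxt : String)
    (rest : List String) (onpath : PySem.Set String) (trail : List String) (h : nxt ∉ onpath) :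
    fpb_scan graph end_ (nxt :: rest) onpath trail =
      match fpb_dfs graph end_ nxt onpath trail with
      | some t => some t
      | none => fpb_scan graph end_ rest onpath trail := by
  rw [fpb_scan.eq_def]; simp [h]

-- B never returns `some []` (A's `if newpath:` test therefore always takes the `some` branch)
lemma fpb_ne_nil (graph : List (String × List String)) (end_ : String) :
    (∀ node onpath trail t, fpb_dfs graph end_ node onpath trail = some t → t ≠ []) ∧
    (∀ nbrs onpath trail t, fpb_scan graph end_ nbrs onpath trail = some t → t ≠ []) :=
  fpb_dfs.mutual_induct graph end_
    (fun node onpath trail => ∀ t, fpb_dfs graph end_ node onpath trail = some t → t ≠ [])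
    (fun nbrs onpath trail => ∀ t, fpb_scan graph end_ nbrs onpath trail = some t → t ≠ [])
    (by intro onpath trail t ht
        rw [fpb_dfs_end graph end_ end_ onpath trail rfl] at ht
        simp at ht; simp [← ht])
    (by intro node onpath trail h1 h2 t ht
        rw [fpb_dfs_none graph end_ node onpath trail h1 h2] at ht; simp at ht)
    (by intro node onpath trail trail' h1 onpath' nbrs h2 ih t ht
        rw [fpb_dfs_some graph end_ node onpath trail nbrs h1 h2] at ht
        exact ih t ht)
    (by intro onpath trail t ht
        rw [fpb_scan_nil] at ht; simp at ht)
    (by intro onpath trail node rest hmem ih t ht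
        rw [fpb_scan_mem graph end_ node rest onpath trail hmem] at ht
        exact ih t ht)
    (by intro onpath trail node rest hmem newpath hd ih t ht
        rw [fpb_scan_notmem graph end_ node rest onpath trail hmem, hd] at ht
        simp at ht; exact ht ▸ ih newpath hd)
    (by intro onpath trail node rest hmem hd ih1 ih2 t ht
        rw [fpb_scan_notmem graph end_ node rest onpath trail hmem, hd] at ht
        exact ih2 t ht)
  |>.imp (fun h node onpath trail => h node onpath trail)
         (fun h nbrs onpath trail => h nbrs onpath trail)

-- main invariant: when the set `onpath` holds exactly the members of the list `trail`,
-- B's dfs computes A's find_path (and B's neighbour scan computes A's loop)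
lemma fpb_eq_find (graph : List (String × List String)) (end_ : String) :
    (∀ node onpath trail, (∀ x, x ∈ onpath ↔ x ∈ trail) →
      fpb_dfs graph end_ node onpath trail = find_path graph node end_ trail) ∧
    (∀ nbrs onpath trail, (∀ x, x ∈ onpath ↔ x ∈ trail) →
      fpb_scan graph end_ nbrs onpath trail = fp_loop graph end_ trail nbrs) :=
  fpb_dfs.mutual_induct graph end_
    (fun node onpath trail => (∀ x, x ∈ onpath ↔ x ∈ trail) →
      fpb_dfs graph end_ node onpath trail = find_path graph node end_ trail)
    (fun nbrs onpath trail => (∀ x, x ∈ onpath ↔ x ∈ trail) →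
      fpb_scan graph end_ nbrs onpath trail = fp_loop graph end_ trail nbrs)
    (by intro onpath trail _
        rw [fpb_dfs_end graph end_ end_ onpath trail rfl,
            find_path_end graph end_ end_ trail rfl])
    (by intro node onpath trail h1 h2 _
        rw [fpb_dfs_none graph end_ node onpath trail h1 h2,
            find_path_none graph node end_ trail h1 h2])
    (by intro node onpath trail trail' h1 onpath' nbrs h2 ih hinv
        rw [fpb_dfs_some graph end_ node onpath trail nbrs h1 h2,
            find_path_some graph node end_ trail nbrs h1 h2]
        exact ih (by intro x; simp [onpath', trail', PySem.Set.mem_add, hinv x]))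
    (by intro onpath trail _
        rw [fpb_scan_nil, fp_loop_nil])
    (by intro onpath trail node rest hmem ih hinv
        rw [fpb_scan_mem graph end_ node rest onpath trail hmem,
            fp_loop_mem graph end_ trail node rest ((hinv node).mp hmem)]
        exact ih hinv)
    (by intro onpath trail node rest hmem newpath hd ih hinv
        have hmem' : node ∉ trail := fun h => hmem ((hinv node).mpr h)
        rw [fpb_scan_notmem graph end_ node rest onpath trail hmem, hd,
            fp_loop_notmem graph end_ trail node rest hmem', ← ih hinv, hd]
        simp [(fpb_ne_nil graph end_).1 node onpath trail newpath hd])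
    (by intro onpath trail node rest hmem hd ih1 ih2 hinv
        have hmem' : node ∉ trail := fun h => hmem ((hinv node).mpr h)
        rw [fpb_scan_notmem graph end_ node rest onpath trail hmem, hd,
            fp_loop_notmem graph end_ trail node rest hmem', ← ih1 hinv, hd]
        exact ih2 hinv)
  |>.imp (fun h node onpath trail => h node onpath trail)
         (fun h nbrs onpath trail => h nbrs onpath trail)

-- ===== VERDICT (by name: the statement is the Claim_ definition above) =====
theorem find_path_spec : Claim_equal_find_path := by
  intro graph start end_ path _
  unfold Spec_find_path find_path_alt
  exact ((fpb_eq_find graph end_).1 start (PySem.Set.ofList path) path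
    (fun x => PySem.Set.mem_ofList path x)).symm
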